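-- pv_equiv track=rewrite | github.com/avonaly/project_euler | solutions/080.py | digits_of
-- ===== SOURCE A (Python) =====
-- def digits_of(n: int):
--     """
--     yields base-10 digits of n from least sig fig up
--     """
--     if n == 0:
--         yield 0
--
--     n_rem = abs(n)  # remaining digits
--     while n_rem > 0:
--         a, b = divmod(n_rem, 10)
--         n_rem = a
--         yield b
-- ===== SOURCE B (Python) =====
-- def digits_of(n: int):
--     """
--     yields base-10 digits of n from least sig fig up
--     (computed from the decimal string, read back to front)
--     """
--     return (int(c) for c in reversed(str(abs(n))))
-- ===== Notes on version B (the rewrite author's own statement) =====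
-- stated objective: idiomatic
-- what changed: B replaces the explicit divmod loop by converting str(abs(n)) once and yielding its characters in reverse as ints; the n == 0 special case disappears because str(0) == '0'.
import Mathlib
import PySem

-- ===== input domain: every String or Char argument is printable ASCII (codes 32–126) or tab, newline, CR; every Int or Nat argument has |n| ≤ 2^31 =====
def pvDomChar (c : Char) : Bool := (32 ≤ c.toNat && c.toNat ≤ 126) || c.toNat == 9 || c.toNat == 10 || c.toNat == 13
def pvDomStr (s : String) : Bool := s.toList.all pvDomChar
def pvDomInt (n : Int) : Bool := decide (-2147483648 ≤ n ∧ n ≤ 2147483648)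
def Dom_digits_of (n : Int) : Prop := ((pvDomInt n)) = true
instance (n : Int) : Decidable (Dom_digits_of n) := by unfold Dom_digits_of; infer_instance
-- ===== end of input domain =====

-- B computes the digits from str(abs(n)) read back to front instead of a divmod loop (idiomatic; same cost).


-- ===== PORT A =====
-- the 'while n_rem > 0' loop, collecting the yielded b's in order
def digitsOfLoop (nrem : Int) : List Int :=
  if _h : nrem > 0 then
    let a := PySem.Int.floordiv nrem 10   -- divmod(n_rem, 10): divisor is the constant 10, never raises
    let b := PySem.Int.mod nrem 10
    b :: digitsOfLoop a
  else []
  termination_by nrem.toNat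
  decreasing_by
    rw [PySem.Int.floordiv_eq_ediv_of_pos (by omega : (0:Int) < 10)]
    omega

def digits_of (n : Int) : List Int :=
  (if n = 0 then [0] else []) ++ digitsOfLoop |n|

-- ===== PORT B =====
-- int(c) on the single decimal digit characters produced by str(abs(n)) is exactly code(c) - 48
def digits_of_alt (n : Int) : List Int :=
  ((PySem.Int.toStr |n|).toList.reverse).map (fun c => ((c.toNat : Int) - 48))

-- ===== PRECONDITION & SPEC =====
def Spec_digits_of (n : Int) (out : List Int) : Prop := out = digits_of_alt n
instance (n : Int) (out : List Int) : Decidable (Spec_digits_of n out) := by unfold Spec_digits_of; infer_instance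

-- ===== CLAIM (what is proved, stated in full; the proofs are below) =====
def Claim_equal_digits_of : Prop := ∀ (n : Int), Dom_digits_of n → Spec_digits_of n (digits_of n)

-- ===== LEMMAS AND PROOFS =====

-- the loop on a natural number argument, in Nat arithmetic
def natLoop (m : Nat) : List Int :=
  if m = 0 then [] else ((m % 10 : Nat) : Int) :: natLoop (m / 10)
  termination_by m
  decreasing_by omega

-- the chars of m written most-significant-last … i.e. digitChars m is LSB-first
def digitChars (m : Nat) : List Char :=
  if m = 0 then [] else Nat.digitChar (m % 10) :: digitChars (m / 10)
  termination_by m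
  decreasing_by omega

lemma digitsOfLoop_natCast (m : Nat) : digitsOfLoop (m : Int) = natLoop m := by
  induction m using Nat.strong_induction_on with
  | _ m ih =>
    rw [digitsOfLoop, natLoop]
    by_cases h : m = 0
    · subst h; simp
    · have h1 : ((m : Int) > 0) := by omega
      have ha : PySem.Int.floordiv (m : Int) 10 = ((m / 10 : Nat) : Int) := by
        rw [PySem.Int.floordiv_eq_ediv_of_pos (by omega : (0:Int) < 10)]; omega
      have hb : PySem.Int.mod (m : Int) 10 = ((m % 10 : Nat) : Int) := by
        rw [PySem.Int.mod_eq_emod_of_pos (by omega : (0:Int) < 10)]; omega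
      simp only [h1, dite_true, if_neg h, ha, hb]
      rw [ih (m / 10) (by omega)]

lemma toDigitsCore_eq (fuel : Nat) :
    ∀ m l, 0 < m → m < fuel →
      Nat.toDigitsCore 10 fuel m l = (digitChars m).reverse ++ l := by
  induction fuel with
  | zero => intro m l hm hf; omega
  | succ f ih =>
    intro m l hm hf
    rw [Nat.toDigitsCore]
    by_cases h : m / 10 = 0
    · have hd : digitChars m = [Nat.digitChar (m % 10)] := by
        rw [digitChars, if_neg (by omega), digitChars, if_pos h]
      simp [h, hd]
    · have hd : digitChars m = Nat.digitChar (m % 10) :: digitChars (m / 10) := by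
        rw [digitChars, if_neg (by omega)]
      simp only [h, if_false]
      rw [ih (m / 10) _ (by omega) (by omega), hd]
      simp

lemma dv_digitChar (d : Nat) (h : d < 10) :
    ((Nat.digitChar d).toNat : Int) - 48 = (d : Int) := by
  interval_cases d <;> decide

lemma map_dv_digitChars (m : Nat) :
    (digitChars m).map (fun c => ((c.toNat : Int) - 48)) = natLoop m := by
  induction m using Nat.strong_induction_on with
  | _ m ih =>
    rw [digitChars, natLoop]
    by_cases h : m = 0
    · simp [h]
    · simp only [if_neg h, List.map_cons]
      rw [dv_digitChar (m % 10) (by omega), ih (m / 10) (by omega)]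

-- ===== VERDICT (by name: the statement is the Claim_ definition above) =====
theorem digits_of_spec : Claim_equal_digits_of := by
  intro n _
  show digits_of n = digits_of_alt n
  unfold digits_of digits_of_alt
  rw [PySem.Int.toList_toStr]
  by_cases h : n = 0
  · subst h
    rw [(by simp : |(0:Int)| = ((0 : Nat) : Int)), digitsOfLoop_natCast, natLoop]
    simp [PySem.Int.toChars, Nat.toDigits, Nat.toDigitsCore]
    decide
  · have habs : ¬ (|n| < 0) := by have := abs_nonneg n; omega
    have hm : 0 < n.natAbs := by omega
    have h2 : (|n|).toNat = n.natAbs := by rw [Int.abs_eq_natAbs]; omega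
    rw [if_neg h, List.nil_append, PySem.Int.toChars, if_neg habs, h2,
        Nat.toDigits, toDigitsCore_eq _ _ _ hm (by omega), List.append_nil,
        List.reverse_reverse, map_dv_digitChars,
        Int.abs_eq_natAbs, digitsOfLoop_natCast]
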